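-- pv_equiv track=rewrite | github.com/YashIndane/codewars-solutions | python/Sum_of_differences_in_array.py | sum_of_differences
-- ===== SOURCE A (Python) =====
-- def sum_of_differences(arr):
--     if len(arr)<=1:
--         return 0
--     else:
--         s=sorted(arr, reverse=True)
--         q=0
--         for i in range(len(s)-1):
--             q+=s[i]-s[i+1]
--         return q
-- ===== SOURCE B (Python) =====
-- def sum_of_differences(arr):
--     if len(arr) <= 1:
--         return 0
--     return max(arr) - min(arr)
-- ===== Notes on version B (the rewrite author's own statement) =====
-- stated objective: faster
-- what changed: The sum of adjacent differences of the descending-sorted list telescopes to max(arr)-min(arr), so B replaces the sort and the index loop by a single max/min pass.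
import Mathlib
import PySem

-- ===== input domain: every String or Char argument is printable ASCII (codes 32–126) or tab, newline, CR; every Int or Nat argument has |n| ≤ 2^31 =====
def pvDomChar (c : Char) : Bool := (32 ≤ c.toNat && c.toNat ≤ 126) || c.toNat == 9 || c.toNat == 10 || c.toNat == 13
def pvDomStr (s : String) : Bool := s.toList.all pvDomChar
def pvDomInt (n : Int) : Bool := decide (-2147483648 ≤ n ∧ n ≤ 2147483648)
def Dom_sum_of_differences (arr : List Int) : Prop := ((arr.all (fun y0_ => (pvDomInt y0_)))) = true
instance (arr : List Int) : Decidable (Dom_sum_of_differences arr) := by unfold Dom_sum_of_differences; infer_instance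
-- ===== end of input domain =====

-- B replaces A's sort + adjacent-difference loop by a single max/min pass: the telescoping sum equals max(arr) - min(arr).

-- ===== PORT A =====
def sum_of_differences (arr : List Int) : Int :=
  if arr.length ≤ 1 then 0
  else
    let s := PySem.List.sorted arr (fun x => x) true
    (PySem.List.pyRange 0 ((s.length : Int) - 1) 1).foldl
      (fun q i => q + (PySem.List.pyGetD s i 0 - PySem.List.pyGetD s (i + 1) 0)) 0

-- ===== PORT B =====
def sum_of_differences_alt (arr : List Int) : Int :=
  if arr.length ≤ 1 then 0
  else ((PySem.List.max? arr (fun x => x)).getD 0) - ((PySem.List.min? arr (fun x => x)).getD 0)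

-- ===== PRECONDITION & SPEC =====
def Spec_sum_of_differences (arr : List Int) (out : Int) : Prop := out = sum_of_differences_alt arr
instance (arr : List Int) (out : Int) : Decidable (Spec_sum_of_differences arr out) := by unfold Spec_sum_of_differences; infer_instance

-- ===== CLAIM (what is proved, stated in full; the proofs are below) =====
def Claim_equal_sum_of_differences : Prop := ∀ (arr : List Int), Dom_sum_of_differences arr → Spec_sum_of_differences arr (sum_of_differences arr)

-- ===== LEMMAS AND PROOFS =====

-- telescoping fold over an index range
theorem tele_foldl (f : Nat → Int) (m : Nat) :
    (List.range m).foldl (fun q k => q + (f k - f (k + 1))) 0 = f 0 - f m := by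
  induction m with
  | zero => simp
  | succ n ih =>
    rw [List.range_succ, List.foldl_append, ih]
    simp only [List.foldl_cons, List.foldl_nil]
    ring

-- in a Pairwise-(≥) list the last element is ≤ every element
theorem last_le_of_pairwise (l : List Int) (h : l.Pairwise (fun a b => b ≤ a))
    (hne : l ≠ []) : ∀ y ∈ l, l.getLast hne ≤ y := by
  induction l with
  | nil => simp
  | cons x t ih =>
    intro y hy
    cases t with
    | nil => simp at hy; simp [hy]
    | cons a u =>
      have hpc := List.pairwise_cons.mp h
      have hne' : a :: u ≠ [] := by simp
      rw [List.getLast_cons hne']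
      rcases List.mem_cons.mp hy with rfl | hy'
      · exact hpc.1 _ (List.getLast_mem hne')
      · exact ih hpc.2 hne' _ hy'

-- head of the descending sort is ≥ every element
theorem head_ge (arr : List Int) (hne : arr ≠ []) (y : Int) (hy : y ∈ arr) :
    y ≤ (PySem.List.sorted arr (fun x => x) true).head
      (by simp [PySem.List.sorted_eq_nil_iff, hne]) := by
  have hsne : PySem.List.sorted arr (fun x => x) true ≠ [] := by
    simp [PySem.List.sorted_eq_nil_iff, hne]
  obtain ⟨m, t, hmt⟩ := List.exists_cons_of_ne_nil hsne
  have := PySem.List.key_head_sorted_rev_ge (xs := arr) (key := fun x => x) hmt y hy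
  simp [hmt] at this ⊢
  exact this

theorem sod_main : ∀ (arr : List Int), sum_of_differences arr = sum_of_differences_alt arr := by
  intro arr
  unfold sum_of_differences sum_of_differences_alt
  by_cases hlen : arr.length ≤ 1
  · simp [hlen]
  · simp only [hlen, if_false]
    have hne : arr ≠ [] := by intro h; simp [h] at hlen
    set s := PySem.List.sorted arr (fun x => x) true with hs
    have hsne : s ≠ [] := by simp [hs, PySem.List.sorted_eq_nil_iff, hne]
    have hperm : s.Perm arr := PySem.List.sorted_perm arr _ _
    have hslen : s.length = arr.length := hperm.length_eq
    have hn : 2 ≤ s.length := by omega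
    -- rewrite A's loop as a telescoping sum
    have hrange : ((s.length : Int) - 1) = (((s.length - 1 : Nat) : Int)) := by
      omega
    have hA : (PySem.List.pyRange 0 ((s.length : Int) - 1) 1).foldl
        (fun q i => q + (PySem.List.pyGetD s i 0 - PySem.List.pyGetD s (i + 1) 0)) 0
        = s.getD 0 0 - s.getD (s.length - 1) 0 := by
      rw [hrange, PySem.List.pyRange_one, List.foldl_map]
      have : ∀ (q : Int) (k : Nat),
          q + (PySem.List.pyGetD s ((0:Int) + k) 0 - PySem.List.pyGetD s ((0:Int) + k + 1) 0)
          = q + (s.getD k 0 - s.getD (k + 1) 0) := by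
        intro q k
        have h1 : ((0:Int) + k) = ((k : Nat) : Int) := by ring
        have h2 : ((0:Int) + k + 1) = (((k + 1 : Nat)) : Int) := by omega
        rw [h2, h1, PySem.List.pyGetD_natCast, PySem.List.pyGetD_natCast]
      simp only [this]
      have hm : ((((s.length - 1 : Nat)) : Int) - 0).toNat = s.length - 1 := by omega
      rw [hm]
      exact tele_foldl (fun k => s.getD k 0) (s.length - 1)
    rw [hA]
    -- identify head/getLast with max/min
    have hhead : s.getD 0 0 = s.head hsne := by
      rw [List.head_eq_getElem]
      exact List.getD_eq_getElem s 0 (by omega)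
    have hlast : s.getD (s.length - 1) 0 = s.getLast hsne := by
      rw [List.getLast_eq_getElem]
      exact List.getD_eq_getElem s 0 (by omega)
    rw [hhead, hlast]
    -- max side
    obtain ⟨mx, hmx⟩ : ∃ mx, PySem.List.max? arr (fun x => x) = some mx := by
      cases h : PySem.List.max? arr (fun x => x) with
      | none => exact absurd (Iff.mp (PySem.List.max?_eq_none_iff arr (fun x => x)) h) hne
      | some m => exact ⟨m, rfl⟩
    obtain ⟨mn, hmn⟩ : ∃ mn, PySem.List.min? arr (fun x => x) = some mn := by
      cases h : PySem.List.min? arr (fun x => x) with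
      | none => exact absurd (Iff.mp (PySem.List.min?_eq_none_iff arr (fun x => x)) h) hne
      | some m => exact ⟨m, rfl⟩
    rw [hmx, hmn]
    simp only [Option.getD_some]
    have hmx_mem : mx ∈ arr := PySem.List.max?_mem hmx
    have hmn_mem : mn ∈ arr := PySem.List.min?_mem hmn
    have hmx_max : ∀ y ∈ arr, y ≤ mx := fun y hy => PySem.List.max?_isMax hmx y hy
    have hmn_min : ∀ y ∈ arr, mn ≤ y := fun y hy => PySem.List.min?_isMin hmn y hy
    have hhead_mem : s.head hsne ∈ arr := hperm.mem_iff.mp (List.head_mem hsne)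
    have hlast_mem : s.getLast hsne ∈ arr := hperm.mem_iff.mp (List.getLast_mem hsne)
    have hpw : s.Pairwise (fun a b => b ≤ a) := PySem.List.sorted_pairwise_rev arr _
    have h1 : s.head hsne = mx :=
      le_antisymm (hmx_max _ hhead_mem) (head_ge arr hne mx hmx_mem)
    have h2 : s.getLast hsne = mn :=
      le_antisymm
        (last_le_of_pairwise s hpw hsne mn (hperm.mem_iff.mpr hmn_mem))
        (hmn_min _ hlast_mem)
    rw [h1, h2]

-- ===== VERDICT (by name: the statement is the Claim_ definition above) =====
theorem sum_of_differences_spec : Claim_equal_sum_of_differences := by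
  intro arr _
  exact sod_main arr
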